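-- pv_equiv track=rewrite | github.com/omarashraaf/mt5-demo-trading-agent | backend/services/meta_model_service.py | _parse_notes_for_artifacts
-- ===== SOURCE A (Python) =====
-- def _parse_notes_for_artifacts(notes: str) -> tuple[str, str]:
--     artifact = ""
--     summary = ""
--     for part in notes.split(";"):
--         piece = part.strip()
--         if piece.startswith("artifact="):
--             artifact = piece.split("=", 1)[1].strip()
--         elif piece.startswith("summary="):
--             summary = piece.split("=", 1)[1].strip()
--     return artifact, summary
-- ===== SOURCE B (Python) =====
-- def _parse_notes_for_artifacts(notes: str) -> tuple[str, str]:
--     fields = {}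
--     for part in notes.split(";"):
--         piece = part.strip()
--         if "=" in piece:
--             key, val = piece.split("=", 1)
--             fields[key] = val.strip()
--     return fields.get("artifact", ""), fields.get("summary", "")
-- ===== Notes on version B (the rewrite author's own statement) =====
-- stated objective: idiomatic
-- what changed: Replaces the per-key if/elif prefix dispatch with one generic key=value parse per segment into a last-wins dict, queried afterwards with .get defaults.
import Mathlib
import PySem

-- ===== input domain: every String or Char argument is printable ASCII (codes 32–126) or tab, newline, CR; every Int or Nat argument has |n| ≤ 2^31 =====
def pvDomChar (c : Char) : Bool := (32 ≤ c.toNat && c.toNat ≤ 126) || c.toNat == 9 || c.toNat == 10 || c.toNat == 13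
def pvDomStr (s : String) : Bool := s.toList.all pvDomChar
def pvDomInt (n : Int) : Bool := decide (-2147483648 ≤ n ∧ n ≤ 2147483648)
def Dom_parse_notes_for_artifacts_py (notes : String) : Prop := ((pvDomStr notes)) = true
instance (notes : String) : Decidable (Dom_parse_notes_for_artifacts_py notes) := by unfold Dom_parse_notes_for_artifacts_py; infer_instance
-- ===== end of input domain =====

-- B replaces A's per-key if/elif prefix dispatch by one generic key=value parse per
-- segment into a last-wins dict, queried afterwards (idiomatic; same asymptotic cost).

-- ===== PORT A =====
-- one iteration of A's for-loop: state is (artifact, summary)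
def pvAStep (st : String × String) (part : String) : String × String :=
  let piece := PySem.Str.strip part
  if PySem.Str.startswith piece "artifact=" then
    match PySem.Str.splitMax? piece "=" 1 with
    | some (_ :: v :: _) => (PySem.Str.strip v, st.2)
    | _ => st   -- unreachable: piece starts with "artifact=" so the split has a second element
  else if PySem.Str.startswith piece "summary=" then
    match PySem.Str.splitMax? piece "=" 1 with
    | some (_ :: v :: _) => (st.1, PySem.Str.strip v)
    | _ => st   -- unreachable, as above
  else st

def parse_notes_for_artifacts_py (notes : String) : String × String :=
  ((PySem.Str.split? notes ";").getD []).foldl pvAStep ("", "")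

-- ===== PORT B =====
-- one iteration of B's for-loop: state is the dict of key=value fields (last wins)
def pvAltStep (d : PySem.Dict String String) (part : String) : PySem.Dict String String :=
  let piece := PySem.Str.strip part
  if PySem.Str.isIn "=" piece then
    match PySem.Str.splitMax? piece "=" 1 with
    | some (key :: val :: _) => d.insert key (PySem.Str.strip val)
    | _ => d   -- unreachable: '=' is in piece so the split has two elements
  else d

def parse_notes_for_artifacts_py_alt (notes : String) : String × String :=
  let fields := ((PySem.Str.split? notes ";").getD []).foldl pvAltStep PySem.Dict.empty
  (fields.getD "artifact" "", fields.getD "summary" "")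

-- ===== PRECONDITION & SPEC =====
def Spec_parse_notes_for_artifacts_py (notes : String) (out : String × String) : Prop := out = parse_notes_for_artifacts_py_alt notes
instance (notes : String) (out : String × String) : Decidable (Spec_parse_notes_for_artifacts_py notes out) := by unfold Spec_parse_notes_for_artifacts_py; infer_instance

-- ===== CLAIM (what is proved, stated in full; the proofs are below) =====
def Claim_equal_parse_notes_for_artifacts_py : Prop := ∀ (notes : String), Dom_parse_notes_for_artifacts_py notes → Spec_parse_notes_for_artifacts_py notes (parse_notes_for_artifacts_py notes)

-- ===== LEMMAS AND PROOFS =====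

-- go with maxsplit budget 0 just flushes the current chunk
lemma pvGoZero (sep : List Char) (fuel : Nat) (l cur : List Char) (acc : List (List Char)) :
    PySem.Chars.splitOnMax.go sep fuel 0 l cur acc = ((cur.reverse ++ l) :: acc).reverse := by
  cases fuel with
  | zero => simp [PySem.Chars.splitOnMax.go]
  | succ f => cases l with
    | nil => simp [PySem.Chars.splitOnMax.go]
    | cons c r => simp [PySem.Chars.splitOnMax.go]

-- go with budget 1 and separator "=" splits at the first '=' (if any)
lemma pvGoOne (p : List Char) (fuel : Nat) (cur : List Char) (acc : List (List Char))
    (h : p.length + 1 ≤ fuel) :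
    PySem.Chars.splitOnMax.go ['='] fuel 1 p cur acc =
      acc.reverse ++ (if '=' ∈ p then
        [cur.reverse ++ p.takeWhile (fun c => c != '='), (p.dropWhile (fun c => c != '=')).tail]
      else [cur.reverse ++ p]) := by
  induction p generalizing fuel cur acc with
  | nil =>
    cases fuel with
    | zero => omega
    | succ f => simp [PySem.Chars.splitOnMax.go]
  | cons c rest ih =>
    cases fuel with
    | zero => simp at h
    | succ f =>
      by_cases hc : c = '='
      · subst hc
        simp only [PySem.Chars.splitOnMax.go, List.isPrefixOf, BEq.rfl, Bool.true_and,
          List.isPrefixOf.eq_1, if_true, if_neg (by omega : ¬ (1 : Nat) = 0)]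
        rw [pvGoZero]
        simp
      · have hpre : ['='].isPrefixOf (c :: rest) = false := by
          simp [List.isPrefixOf]
          exact fun hh => absurd hh.symm hc
        simp only [PySem.Chars.splitOnMax.go, if_neg (by omega : ¬ (1 : Nat) = 0), hpre,
          Bool.false_eq_true, if_false]
        rw [ih f (c :: cur) acc (by simp at h ⊢; omega)]
        have hmem : ('=' ∈ c :: rest) ↔ ('=' ∈ rest) := by
          constructor
          · intro hm; rcases List.mem_cons.mp hm with h1 | h1
            · exact absurd h1.symm hc
            · exact h1
          · intro hm; exact List.mem_cons_of_mem _ hm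
        have hb : (c != '=') = true := by simpa using (bne_iff_ne (a := c) (b := '=')).mpr hc
        by_cases hm : '=' ∈ rest
        · simp [hm, hmem, hb]
        · simp [hm, hmem, hb]

-- the char-level split with maxsplit 1 at '='
lemma pvSplitOnMaxEq (p : List Char) (h : '=' ∈ p) :
    PySem.Chars.splitOnMax p ['='] 1 =
      [p.takeWhile (fun c => c != '='), (p.dropWhile (fun c => c != '=')).tail] := by
  unfold PySem.Chars.splitOnMax
  rw [if_neg (by norm_num)]
  simp only [Int.toNat_one]
  rw [pvGoOne p (p.length + 1) [] [] (by omega)]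
  simp [h]

-- shape of a list containing '=': key ++ '=' :: rest-of-value
lemma pvSplitShape (p : List Char) (h : '=' ∈ p) :
    p = p.takeWhile (fun c => c != '=') ++ '=' :: (p.dropWhile (fun c => c != '=')).tail := by
  induction p with
  | nil => cases h
  | cons c rest ih =>
    by_cases hc : c = '='
    · subst hc; simp
    · have hm : '=' ∈ rest := by
        rcases List.mem_cons.mp h with h1 | h1
        · exact absurd h1.symm hc
        · exact h1
      have hb : (c != '=') = true := by simpa using (bne_iff_ne (a := c) (b := '=')).mpr hc
      simp only [List.takeWhile_cons, List.dropWhile_cons, hb, if_true, List.cons_append]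
      exact congrArg (c :: ·) (ih hm)

lemma pvTakeWhilePre (pre t : List Char) (hpre : '=' ∉ pre) :
    (pre ++ '=' :: t).takeWhile (fun c => c != '=') = pre := by
  induction pre with
  | nil => simp
  | cons c r ih =>
    have hc : c ≠ '=' := fun hh => hpre (hh ▸ List.mem_cons_self)
    have hb : (c != '=') = true := by simpa using (bne_iff_ne (a := c) (b := '=')).mpr hc
    simp only [List.cons_append, List.takeWhile_cons, hb, if_true]
    exact congrArg (c :: ·) (ih (fun hm => hpre (List.mem_cons_of_mem _ hm)))

-- startswith (pre ++ "=") iff the pre-'=' token equals pre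
lemma pvStartswithIff (pre p : List Char) (hpre : '=' ∉ pre) (h : '=' ∈ p) :
    PySem.Chars.startswith p (pre ++ ['=']) = true ↔ p.takeWhile (fun c => c != '=') = pre := by
  unfold PySem.Chars.startswith
  rw [List.isPrefixOf_iff_prefix]
  constructor
  · rintro ⟨t, ht⟩
    rw [← ht]
    simpa using pvTakeWhilePre pre t hpre
  · intro hk
    refine ⟨(p.dropWhile (fun c => c != '=')).tail, ?_⟩
    have := pvSplitShape p h
    rw [hk] at this
    simpa using this.symm

-- '=' ∈ p iff "=" is `in` p
lemma pvMemIffIsIn (p : List Char) : '=' ∈ p ↔ PySem.Chars.isIn ['='] p = true := by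
  rw [PySem.Chars.isIn_iff_infix]
  constructor
  · intro hm
    rcases List.append_of_mem hm with ⟨l, r, hh⟩
    exact ⟨l, r, by simp [hh]⟩
  · rintro ⟨l, r, hh⟩
    rw [← hh]; simp

-- the Str-level split with maxsplit 1, when '=' occurs
lemma pvSplitMaxStr (piece : String) (h : '=' ∈ piece.toList) :
    ∃ K V : String, PySem.Str.splitMax? piece "=" 1 = some [K, V] ∧
      K.toList = piece.toList.takeWhile (fun c => c != '=') ∧
      V.toList = (piece.toList.dropWhile (fun c => c != '=')).tail := by
  have hb := PySem.Str.splitMax?_map piece "=" 1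
  rw [show ("=" : String).toList = ['='] from rfl] at hb
  simp only [PySem.Chars.splitMax?, List.isEmpty_cons, if_neg (by simp : ¬ (false = true))] at hb
  rw [pvSplitOnMaxEq piece.toList h] at hb
  cases hq : PySem.Str.splitMax? piece "=" 1 with
  | none => rw [hq] at hb; simp at hb
  | some L =>
    rw [hq] at hb
    simp only [Option.map_some, Option.some.injEq] at hb
    cases L with
    | nil => simp at hb
    | cons K L' => cases L' with
      | nil => simp at hb
      | cons V L'' => cases L'' with
        | cons w l => simp at hb
        | nil =>
          simp only [List.map_cons, List.map_nil, List.cons.injEq, and_true] at hb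
          exact ⟨K, V, rfl, hb.1, hb.2⟩

-- per-iteration invariant: the dict's two lookups track A's pair
lemma pvStepInv (d : PySem.Dict String String) (a s part : String)
    (ha : d.getD "artifact" "" = a) (hs : d.getD "summary" "" = s) :
    (pvAltStep d part).getD "artifact" "" = (pvAStep (a, s) part).1 ∧
    (pvAltStep d part).getD "summary" "" = (pvAStep (a, s) part).2 := by
  unfold pvAStep pvAltStep
  set piece := PySem.Str.strip part with hpiece
  by_cases hin : PySem.Str.isIn "=" piece = true
  · have hmem : '=' ∈ piece.toList := by
      rw [pvMemIffIsIn]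
      rw [PySem.Str.isIn_eq] at hin
      simpa using hin
    obtain ⟨K, V, hsplit, hK, hV⟩ := pvSplitMaxStr piece hmem
    have hart : PySem.Str.startswith piece "artifact=" = true ↔ K = "artifact" := by
      rw [PySem.Str.startswith_eq,
        show ("artifact=" : String).toList = "artifact".toList ++ ['='] from rfl,
        pvStartswithIff "artifact".toList piece.toList (by decide) hmem, ← hK]
      exact ⟨fun hh => String.toList_inj.mp (by rw [hh]), fun hh => by rw [hh]⟩
    have hsum : PySem.Str.startswith piece "summary=" = true ↔ K = "summary" := by
      rw [PySem.Str.startswith_eq,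
        show ("summary=" : String).toList = "summary".toList ++ ['='] from rfl,
        pvStartswithIff "summary".toList piece.toList (by decide) hmem, ← hK]
      exact ⟨fun hh => String.toList_inj.mp (by rw [hh]), fun hh => by rw [hh]⟩
    rw [if_pos hin, hsplit]
    by_cases hKa : K = "artifact"
    · rw [if_pos (hart.mpr hKa), hsplit, hKa]
      constructor
      · simp [PySem.Dict.getD_insert_self]
      · rw [PySem.Dict.getD_insert_of_ne _ _ _ (by decide : ("summary" : String) ≠ "artifact")]
        exact hs
    · by_cases hKs : K = "summary"
      · rw [if_neg (fun hh => hKa (hart.mp hh)), if_pos (hsum.mpr hKs), hsplit, hKs]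
        constructor
        · rw [PySem.Dict.getD_insert_of_ne _ _ _ (by decide : ("artifact" : String) ≠ "summary")]
          exact ha
        · simp [PySem.Dict.getD_insert_self]
      · rw [if_neg (fun hh => hKa (hart.mp hh)), if_neg (fun hh => hKs (hsum.mp hh))]
        constructor
        · rw [PySem.Dict.getD_insert_of_ne _ _ _ (fun hh => hKa hh.symm)]; exact ha
        · rw [PySem.Dict.getD_insert_of_ne _ _ _ (fun hh => hKs hh.symm)]; exact hs
  · -- no '=' in the piece: neither program changes its state
    have hart : ¬ PySem.Str.startswith piece "artifact=" = true := by
      intro hh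
      apply hin
      rw [PySem.Str.startswith_eq] at hh
      have hp : ("artifact=" : String).toList <+: piece.toList := by
        rw [PySem.Chars.startswith] at hh; exact List.isPrefixOf_iff_prefix.mp hh
      have hmem : '=' ∈ piece.toList := hp.subset (by decide)
      rw [PySem.Str.isIn_eq]
      simpa using (pvMemIffIsIn piece.toList).mp hmem
    have hsum : ¬ PySem.Str.startswith piece "summary=" = true := by
      intro hh
      apply hin
      rw [PySem.Str.startswith_eq] at hh
      have hp : ("summary=" : String).toList <+: piece.toList := by
        rw [PySem.Chars.startswith] at hh; exact List.isPrefixOf_iff_prefix.mp hh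
      have hmem : '=' ∈ piece.toList := hp.subset (by decide)
      rw [PySem.Str.isIn_eq]
      simpa using (pvMemIffIsIn piece.toList).mp hmem
    rw [if_neg hin, if_neg hart, if_neg hsum]
    exact ⟨ha, hs⟩

-- folding the whole parts list preserves the invariant
lemma pvFoldInv (parts : List String) (d : PySem.Dict String String) (a s : String)
    (ha : d.getD "artifact" "" = a) (hs : d.getD "summary" "" = s) :
    ((parts.foldl pvAltStep d).getD "artifact" "",
     (parts.foldl pvAltStep d).getD "summary" "") = parts.foldl pvAStep (a, s) := by
  induction parts generalizing d a s with
  | nil => simp [ha, hs]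
  | cons part rest ih =>
    simp only [List.foldl_cons]
    obtain ⟨h1, h2⟩ := pvStepInv d a s part ha hs
    have := ih (pvAltStep d part) (pvAStep (a, s) part).1 (pvAStep (a, s) part).2 h1 h2
    simpa using this

-- ===== VERDICT (by name: the statement is the Claim_ definition above) =====
theorem parse_notes_for_artifacts_py_spec : Claim_equal_parse_notes_for_artifacts_py := by
  intro notes _
  unfold Spec_parse_notes_for_artifacts_py parse_notes_for_artifacts_py parse_notes_for_artifacts_py_alt
  exact (pvFoldInv _ PySem.Dict.empty "" "" rfl rfl).symm
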